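-- pv_equiv track=rewrite | github.com/rookiestar28/Social-Threads-booster | scripts/platform_workflow_routing.py | _platform_profile_note
-- ===== SOURCE A (Python) =====
-- VIDEO_FIRST_PLATFORMS = {"youtube", "tiktok"}
--
-- MEDIA_CENTRIC_PLATFORMS = {"instagram", "pinterest"}
--
-- FORUM_PLATFORMS = {"reddit"}
--
-- PROFESSIONAL_PLATFORMS = {"linkedin"}
--
-- TEXT_NATIVE_PLATFORMS = {"threads", "x", "bluesky", "mastodon", "facebook_pages"}
--
-- def _platform_profile_note(platform: str, content_formats: tuple[str, ...]) -> str: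
--     if platform in VIDEO_FIRST_PLATFORMS or "video" in content_formats:
--         return "video-first platform: preserve video format, watch-time/context notes, and avoid text-native draft assumptions"
--     if platform in MEDIA_CENTRIC_PLATFORMS or any(fmt in {"image", "media"} for fmt in content_formats):
--         return "media-centric platform: preserve visual/link context and avoid comment-thread assumptions"
--     if platform in FORUM_PLATFORMS:
--         return "forum-shaped platform: compare submission/comment dynamics separately from creator-feed posts"
--     if platform in PROFESSIONAL_PLATFORMS:
--         return "professional platform: keep member/organization context and professional interaction norms explicit"
--     if platform in TEXT_NATIVE_PLATFORMS:
--         return "text-native platform: text comparison is acceptable, but metric availability still stays platform-specific"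
--     return "platform profile is unknown; route conservatively and avoid cross-platform assumptions"
-- ===== SOURCE B (Python) =====
-- # Arithmetic routing: platform and formats each map to a numeric priority;
-- # the answer is the note at the minimum priority seen (min-reduction, no branch chain).
-- _NOTES = [
--     "video-first platform: preserve video format, watch-time/context notes, and avoid text-native draft assumptions",
--     "media-centric platform: preserve visual/link context and avoid comment-thread assumptions",
--     "forum-shaped platform: compare submission/comment dynamics separately from creator-feed posts",
--     "professional platform: keep member/organization context and professional interaction norms explicit",
--     "text-native platform: text comparison is acceptable, but metric availability still stays platform-specific",
--     "platform profile is unknown; route conservatively and avoid cross-platform assumptions",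
-- ]
--
-- _PLATFORM_PRIORITY = {
--     "youtube": 0, "tiktok": 0,
--     "instagram": 1, "pinterest": 1,
--     "reddit": 2,
--     "linkedin": 3,
--     "threads": 4, "x": 4, "bluesky": 4, "mastodon": 4, "facebook_pages": 4,
-- }
--
-- _FORMAT_PRIORITY = {"video": 0, "image": 1, "media": 1}
--
--
-- def _platform_profile_note(platform: str, content_formats: tuple[str, ...]) -> str:
--     idx = _PLATFORM_PRIORITY.get(platform, 5)
--     for fmt in content_formats:
--         idx = min(idx, _FORMAT_PRIORITY.get(fmt, 5))
--     return _NOTES[idx]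
-- ===== Notes on version B (the rewrite author's own statement) =====
-- stated objective: alternative
-- what changed: Replaced the first-match if-chain with an arithmetic scheme: platform and each content format are mapped to numeric priorities and the result is the note at the minimum priority, computed by a single min-reduction.
import Mathlib
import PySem

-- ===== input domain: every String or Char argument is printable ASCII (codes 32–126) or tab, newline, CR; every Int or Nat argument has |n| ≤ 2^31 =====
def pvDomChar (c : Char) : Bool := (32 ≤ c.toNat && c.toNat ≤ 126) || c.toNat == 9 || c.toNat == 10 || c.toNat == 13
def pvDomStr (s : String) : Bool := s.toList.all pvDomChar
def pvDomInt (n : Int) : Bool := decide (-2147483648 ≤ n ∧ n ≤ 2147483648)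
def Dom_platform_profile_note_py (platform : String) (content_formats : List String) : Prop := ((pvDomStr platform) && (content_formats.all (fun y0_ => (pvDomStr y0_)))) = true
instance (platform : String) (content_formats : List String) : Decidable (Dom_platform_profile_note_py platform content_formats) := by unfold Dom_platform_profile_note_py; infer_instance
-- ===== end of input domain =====

-- B replaces A's first-match if-chain by an arithmetic scheme: platform and formats map to
-- numeric priorities and the answer is the note at the minimum priority (objective: alternative).

-- ===== PORT A =====
def VIDEO_FIRST_PLATFORMS : PySem.Set String := PySem.Set.ofList ["youtube", "tiktok"]
def MEDIA_CENTRIC_PLATFORMS : PySem.Set String := PySem.Set.ofList ["instagram", "pinterest"]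
def FORUM_PLATFORMS : PySem.Set String := PySem.Set.ofList ["reddit"]
def PROFESSIONAL_PLATFORMS : PySem.Set String := PySem.Set.ofList ["linkedin"]
def TEXT_NATIVE_PLATFORMS : PySem.Set String := PySem.Set.ofList ["threads", "x", "bluesky", "mastodon", "facebook_pages"]

def platform_profile_note_py (platform : String) (content_formats : List String) : String :=
  if platform ∈ VIDEO_FIRST_PLATFORMS ∨ "video" ∈ content_formats then
    "video-first platform: preserve video format, watch-time/context notes, and avoid text-native draft assumptions"
  else if platform ∈ MEDIA_CENTRIC_PLATFORMS ∨
      content_formats.any (fun fmt => (PySem.Set.ofList ["image", "media"]).contains fmt) then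
    "media-centric platform: preserve visual/link context and avoid comment-thread assumptions"
  else if platform ∈ FORUM_PLATFORMS then
    "forum-shaped platform: compare submission/comment dynamics separately from creator-feed posts"
  else if platform ∈ PROFESSIONAL_PLATFORMS then
    "professional platform: keep member/organization context and professional interaction norms explicit"
  else if platform ∈ TEXT_NATIVE_PLATFORMS then
    "text-native platform: text comparison is acceptable, but metric availability still stays platform-specific"
  else
    "platform profile is unknown; route conservatively and avoid cross-platform assumptions"

-- ===== PORT B =====
def pvNotes : List String :=
  [ "video-first platform: preserve video format, watch-time/context notes, and avoid text-native draft assumptions",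
    "media-centric platform: preserve visual/link context and avoid comment-thread assumptions",
    "forum-shaped platform: compare submission/comment dynamics separately from creator-feed posts",
    "professional platform: keep member/organization context and professional interaction norms explicit",
    "text-native platform: text comparison is acceptable, but metric availability still stays platform-specific",
    "platform profile is unknown; route conservatively and avoid cross-platform assumptions" ]

def pvPlatformPriority : PySem.Dict String Nat :=
  PySem.Dict.ofList
    [ ("youtube", 0), ("tiktok", 0),
      ("instagram", 1), ("pinterest", 1),
      ("reddit", 2),
      ("linkedin", 3),
      ("threads", 4), ("x", 4), ("bluesky", 4), ("mastodon", 4), ("facebook_pages", 4) ]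

def pvFormatPriority : PySem.Dict String Nat :=
  PySem.Dict.ofList [("video", 0), ("image", 1), ("media", 1)]

def platform_profile_note_py_alt (platform : String) (content_formats : List String) : String :=
  let idx := content_formats.foldl
    (fun i fmt => min i (pvFormatPriority.getD fmt 5))
    (pvPlatformPriority.getD platform 5)
  pvNotes.getD idx ""

-- ===== PRECONDITION & SPEC =====
def Spec_platform_profile_note_py (platform : String) (content_formats : List String) (out : String) : Prop := out = platform_profile_note_py_alt platform content_formats
instance (platform : String) (content_formats : List String) (out : String) : Decidable (Spec_platform_profile_note_py platform content_formats out) := by unfold Spec_platform_profile_note_py; infer_instance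

-- ===== CLAIM (what is proved, stated in full; the proofs are below) =====
def Claim_equal_platform_profile_note_py : Prop := ∀ (platform : String) (content_formats : List String), Dom_platform_profile_note_py platform content_formats → Spec_platform_profile_note_py platform content_formats (platform_profile_note_py platform content_formats)

-- ===== LEMMAS AND PROOFS =====

-- The platform-priority lookup, as an if-chain over the eleven known platforms.
theorem pvPlatChar (p : String) : pvPlatformPriority.getD p 5 =
    if p = "youtube" ∨ p = "tiktok" then 0
    else if p = "instagram" ∨ p = "pinterest" then 1
    else if p = "reddit" then 2
    else if p = "linkedin" then 3
    else if p = "threads" ∨ p = "x" ∨ p = "bluesky" ∨ p = "mastodon" ∨ p = "facebook_pages" then 4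
    else 5 := by
  by_cases h1 : p = "youtube";   · subst h1; decide
  by_cases h2 : p = "tiktok";    · subst h2; decide
  by_cases h3 : p = "instagram"; · subst h3; decide
  by_cases h4 : p = "pinterest"; · subst h4; decide
  by_cases h5 : p = "reddit";    · subst h5; decide
  by_cases h6 : p = "linkedin";  · subst h6; decide
  by_cases h7 : p = "threads";   · subst h7; decide
  by_cases h8 : p = "x";         · subst h8; decide
  by_cases h9 : p = "bluesky";   · subst h9; decide
  by_cases h10 : p = "mastodon"; · subst h10; decide
  by_cases h11 : p = "facebook_pages"; · subst h11; decide
  have hmk : pvPlatformPriority = PySem.Dict.mk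
      [ ("youtube", 0), ("tiktok", 0), ("instagram", 1), ("pinterest", 1), ("reddit", 2),
        ("linkedin", 3), ("threads", 4), ("x", 4), ("bluesky", 4), ("mastodon", 4),
        ("facebook_pages", 4) ] := by decide
  rw [hmk]
  simp only [PySem.Dict.getD_eq_get?_getD, PySem.Dict.get?_mk_cons, beq_iff_eq]
  simp [PySem.Dict.get?, h1, h2, h3, h4, h5, h6, h7, h8, h9, h10, h11,
    Ne.symm h1, Ne.symm h2, Ne.symm h3, Ne.symm h4, Ne.symm h5, Ne.symm h6,
    Ne.symm h7, Ne.symm h8, Ne.symm h9, Ne.symm h10, Ne.symm h11]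

-- The format-priority lookup, as an if-chain over the three known formats.
theorem pvFmtChar (f : String) : pvFormatPriority.getD f 5 =
    if f = "video" then 0 else if f = "image" ∨ f = "media" then 1 else 5 := by
  by_cases h1 : f = "video"; · subst h1; decide
  by_cases h2 : f = "image"; · subst h2; decide
  by_cases h3 : f = "media"; · subst h3; decide
  have hmk : pvFormatPriority = PySem.Dict.mk [("video", 0), ("image", 1), ("media", 1)] := by
    decide
  rw [hmk]
  simp only [PySem.Dict.getD_eq_get?_getD, PySem.Dict.get?_mk_cons, beq_iff_eq]
  simp [PySem.Dict.get?, h1, h2, h3, Ne.symm h1, Ne.symm h2, Ne.symm h3]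

-- The min-fold over format priorities, started at i ≤ 5, is 0 if "video" occurs,
-- else min i 1 if "image"/"media" occurs, else i.
theorem pvFoldChar (cf : List String) : ∀ (i : Nat), i ≤ 5 →
    cf.foldl (fun i fmt => min i (pvFormatPriority.getD fmt 5)) i =
      (if "video" ∈ cf then 0
       else if ∃ f ∈ cf, f = "image" ∨ f = "media" then min i 1
       else i) := by
  induction cf with
  | nil => intro i _; simp
  | cons f cf ih =>
    intro i hi
    rw [List.foldl_cons, pvFmtChar f]
    by_cases hv : f = "video"
    · subst hv
      rw [if_pos rfl, Nat.min_zero, ih 0 (by omega),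
        if_pos (List.mem_cons_self : ("video" : String) ∈ "video" :: cf)]
      split_ifs <;> rfl
    · rw [if_neg hv]
      have hmem : ("video" ∈ f :: cf) ↔ ("video" ∈ cf) := by
        rw [List.mem_cons]; exact or_iff_right (fun h => hv h.symm)
      by_cases him : f = "image" ∨ f = "media"
      · rw [if_pos him, ih (min i 1) (le_trans (Nat.min_le_left _ _) hi)]
        have hex : ∃ g ∈ f :: cf, g = "image" ∨ g = "media" :=
          ⟨f, List.mem_cons_self, him⟩
        by_cases hv' : "video" ∈ cf
        · rw [if_pos hv', if_pos (hmem.mpr hv')]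
        · rw [if_neg hv', if_neg (fun h => hv' (hmem.mp h)), if_pos hex]
          by_cases hc : ∃ g ∈ cf, g = "image" ∨ g = "media"
          · rw [if_pos hc]; omega
          · rw [if_neg hc]
      · rw [if_neg him, Nat.min_eq_left hi, ih i hi]
        have hex : (∃ g ∈ f :: cf, g = "image" ∨ g = "media") ↔
            (∃ g ∈ cf, g = "image" ∨ g = "media") := by
          constructor
          · rintro ⟨g, hg, hgi⟩
            rcases List.mem_cons.mp hg with h | h
            · exact absurd (h ▸ hgi) him
            · exact ⟨g, h, hgi⟩
          · rintro ⟨g, hg, hgi⟩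
            exact ⟨g, List.mem_cons_of_mem f hg, hgi⟩
        simp only [hmem, hex]

-- A's inner set test equals the plain two-way string comparison.
theorem pvContainsChar (fmt : String) :
    (PySem.Set.ofList ["image", "media"]).contains fmt =
      decide (fmt = "image" ∨ fmt = "media") := by
  by_cases h1 : fmt = "image"; · subst h1; decide
  by_cases h2 : fmt = "media"; · subst h2; decide
  simp [PySem.Set.contains_eq_listContains, h1, h2]

-- ===== VERDICT (by name: the statement is the Claim_ definition above) =====
theorem platform_profile_note_py_spec : Claim_equal_platform_profile_note_py := by
  intro platform content_formats _
  unfold Spec_platform_profile_note_py platform_profile_note_py platform_profile_note_py_alt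
  have hp : pvPlatformPriority.getD platform 5 ≤ 5 := by
    rw [pvPlatChar]; split_ifs <;> omega
  rw [pvFoldChar content_formats _ hp, pvPlatChar]
  clear hp
  have hany : (content_formats.any fun fmt => (PySem.Set.ofList ["image", "media"]).contains fmt) =
      decide (∃ f ∈ content_formats, f = "image" ∨ f = "media") := by
    by_cases h : ∃ f ∈ content_formats, f = "image" ∨ f = "media"
    · simp [h, List.any_eq_true]
    · simp only [h, decide_false, List.any_eq_false, pvContainsChar]
      intro x hx
      push Not at h
      simp [h x hx]
  have hVF : (platform ∈ VIDEO_FIRST_PLATFORMS) ↔ (platform = "youtube" ∨ platform = "tiktok") := by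
    simp [VIDEO_FIRST_PLATFORMS, PySem.Set.mem_ofList]
  have hMC : (platform ∈ MEDIA_CENTRIC_PLATFORMS) ↔
      (platform = "instagram" ∨ platform = "pinterest") := by
    simp [MEDIA_CENTRIC_PLATFORMS, PySem.Set.mem_ofList]
  have hFO : (platform ∈ FORUM_PLATFORMS) ↔ (platform = "reddit") := by
    simp [FORUM_PLATFORMS, PySem.Set.mem_ofList]
  have hPR : (platform ∈ PROFESSIONAL_PLATFORMS) ↔ (platform = "linkedin") := by
    simp [PROFESSIONAL_PLATFORMS, PySem.Set.mem_ofList]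
  have hTN : (platform ∈ TEXT_NATIVE_PLATFORMS) ↔ (platform = "threads" ∨ platform = "x" ∨
      platform = "bluesky" ∨ platform = "mastodon" ∨ platform = "facebook_pages") := by
    simp [TEXT_NATIVE_PLATFORMS, PySem.Set.mem_ofList]
  simp only [hVF, hMC, hFO, hPR, hTN, hany, decide_eq_true_eq]
  by_cases hv : "video" ∈ content_formats <;>
    by_cases hm : ∃ f ∈ content_formats, f = "image" ∨ f = "media" <;>
    simp only [hv, hm, or_true, or_false, not_false_iff, if_pos, if_neg] <;>
    first
      | (split_ifs <;> simp_all [pvNotes, List.getD])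
      | simp_all [pvNotes, List.getD]
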